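-- pv_equiv track=rewrite | github.com/m1sterzer0/DaveProgrammingCompetitions | hackercup/python/2021/qual_A1.py | solve
-- ===== SOURCE A (Python) =====
-- def solve(S) :
--     best = 10**18
--     for l in "ABCDEFGHIJKLMNOPQRSTUVWXYZ" :
--         lisvowel = l in "AEIOU"
--         cand = 0
--         for c in S :
--             if c == l : continue
--             cisvowel = c in "AEIOU"
--             cand += 2 if cisvowel == lisvowel else 1
--         best = min(best,cand)
--     return best
-- ===== SOURCE B (Python) =====
-- def solve(S):
--     # One pass: count each character once, then a closed-form cost per candidate letter.
--     cnt = {}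
--     for c in S:
--         cnt[c] = cnt.get(c, 0) + 1
--     n = len(S)
--     V = 0
--     for v in "AEIOU":
--         V += cnt.get(v, 0)
--     best = 10**18
--     for l in "ABCDEFGHIJKLMNOPQRSTUVWXYZ":
--         same = V if l in "AEIOU" else n - V
--         best = min(best, 2 * (same - cnt.get(l, 0)) + (n - same))
--     return best
-- ===== Notes on version B (the rewrite author's own statement) =====
-- stated objective: faster
-- what changed: B counts every character once (a frequency dict plus the vowel total) and computes each candidate letter's cost by a closed-form formula, instead of A's rescanning the whole string for each of the 26 letters.
import Mathlib
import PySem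

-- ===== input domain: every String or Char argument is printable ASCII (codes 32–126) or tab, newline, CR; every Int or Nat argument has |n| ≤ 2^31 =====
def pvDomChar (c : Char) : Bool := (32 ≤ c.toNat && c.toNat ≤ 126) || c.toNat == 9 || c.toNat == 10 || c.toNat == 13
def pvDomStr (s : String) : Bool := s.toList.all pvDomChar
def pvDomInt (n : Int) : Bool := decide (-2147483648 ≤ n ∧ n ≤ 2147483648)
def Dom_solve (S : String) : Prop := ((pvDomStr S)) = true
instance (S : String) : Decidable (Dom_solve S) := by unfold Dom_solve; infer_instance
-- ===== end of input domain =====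

-- B replaces A's 26 full rescans of S by one counting pass and a closed-form cost per letter (faster, constant-factor).

-- ===== PORT A =====
-- 'c in "AEIOU"' on a single char equals membership in its char list (exact here).
def solve (S : String) : Int :=
  "ABCDEFGHIJKLMNOPQRSTUVWXYZ".toList.foldl (fun best l =>
    let lisvowel := "AEIOU".toList.contains l
    let cand := S.toList.foldl (fun cand c =>
      if c = l then cand
      else
        let cisvowel := "AEIOU".toList.contains c
        if cisvowel = lisvowel then cand + 2 else cand + 1) 0
    min best cand) (10 ^ 18)

-- ===== PORT B =====
-- 'cnt[c] = cnt.get(c, 0) + 1' is exactly Dict.modify c 0 (· + 1).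
def solve_alt (S : String) : Int :=
  let cnt := S.toList.foldl (fun d c => d.modify c 0 (· + 1)) (PySem.Dict.empty)
  let n : Int := S.toList.length
  let V : Int := "AEIOU".toList.foldl (fun s v => s + cnt.getD v 0) 0
  "ABCDEFGHIJKLMNOPQRSTUVWXYZ".toList.foldl (fun best l =>
    let same := if "AEIOU".toList.contains l then V else n - V
    min best (2 * (same - cnt.getD l 0) + (n - same))) (10 ^ 18)

-- ===== PRECONDITION & SPEC =====
def Spec_solve (S : String) (out : Int) : Prop := out = solve_alt S
instance (S : String) (out : Int) : Decidable (Spec_solve S out) := by unfold Spec_solve; infer_instance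

-- ===== CLAIM (what is proved, stated in full; the proofs are below) =====
def Claim_equal_solve : Prop := ∀ (S : String), Dom_solve S → Spec_solve S (solve S)

-- ===== LEMMAS AND PROOFS =====

def pvIsv (c : Char) : Bool := "AEIOU".toList.contains c

def pvCv (cs : List Char) : Int := (cs.countP pvIsv : Int)

lemma pvCv_cons (c : Char) (cs : List Char) :
    pvCv (c :: cs) = pvCv cs + (if "AEIOU".toList.contains c then 1 else 0) := by
  have h : pvIsv c = "AEIOU".toList.contains c := rfl
  by_cases hc : pvIsv c <;> rw [← h] <;> simp [pvCv, hc]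

lemma pvCount_cons (l c : Char) (cs : List Char) :
    ((c :: cs).count l : Int) = (cs.count l : Int) + (if c = l then 1 else 0) := by
  by_cases h : c = l <;> simp [h]

-- vowel count splits into the five letter counts
lemma pvCv_split (cs : List Char) :
    pvCv cs = (cs.count 'A' : Int) + cs.count 'E' + cs.count 'I' + cs.count 'O' + cs.count 'U' := by
  induction cs with
  | nil => simp [pvCv]
  | cons c cs ih =>
    rw [pvCv_cons, ih, pvCount_cons 'A', pvCount_cons 'E', pvCount_cons 'I',
        pvCount_cons 'O', pvCount_cons 'U']
    by_cases hA : c = 'A' <;> by_cases hE : c = 'E' <;> by_cases hI : c = 'I' <;>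
      by_cases hO : c = 'O' <;> by_cases hU : c = 'U' <;>
      simp_all <;> ring

-- A's inner loop over S in closed form
lemma pvInner (l : Char) (cs : List Char) (a : Int) :
    cs.foldl (fun cand c =>
      if c = l then cand
      else if ("AEIOU".toList.contains c) = ("AEIOU".toList.contains l) then cand + 2
      else cand + 1) a
    = a + 2 * ((if "AEIOU".toList.contains l then pvCv cs else (cs.length : Int) - pvCv cs)
                - cs.count l)
        + ((cs.length : Int)
            - (if "AEIOU".toList.contains l then pvCv cs else (cs.length : Int) - pvCv cs)) := by
  induction cs generalizing a with
  | nil => simp [pvCv]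
  | cons c cs ih =>
    simp only [List.foldl_cons]
    rw [ih, pvCv_cons, pvCount_cons l c, List.length_cons]
    have hlen : ((cs.length + 1 : Nat) : Int) = (cs.length : Int) + 1 := by push_cast; ring
    rw [hlen]
    by_cases hcl : c = l
    · subst hcl
      cases hc : "AEIOU".toList.contains c <;>
        simp only [if_true, if_false, Bool.false_eq_true] <;> omega
    · cases hc : "AEIOU".toList.contains c <;> cases hl : "AEIOU".toList.contains l <;>
        simp only [if_neg hcl, if_true] <;> simp <;> omega

lemma pvCnt_getD (cs : List Char) (l : Char) :
    (cs.foldl (fun d c => d.modify c 0 (· + 1)) (PySem.Dict.empty)).getD l 0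
      = (cs.count l : Int) := by
  have h : cs.foldl (fun d c => d.modify c 0 (· + 1)) (PySem.Dict.empty)
      = PySem.Dict.counter cs := by
    rw [PySem.Dict.counter_eq_foldl]
  rw [h, PySem.Dict.getD_counter]

-- ===== VERDICT (by name: the statement is the Claim_ definition above) =====
theorem solve_spec : Claim_equal_solve := by
  intro S _
  unfold Spec_solve
  dsimp only [solve, solve_alt]
  have hV : "AEIOU".toList.foldl
      (fun s v => s + (S.toList.foldl (fun d c => d.modify c 0 (· + 1))
        (PySem.Dict.empty)).getD v 0) 0 = pvCv S.toList := by
    rw [show "AEIOU".toList = ['A', 'E', 'I', 'O', 'U'] from rfl]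
    simp only [List.foldl_cons, List.foldl_nil, pvCnt_getD, pvCv_split]
    ring
  rw [hV]
  simp only [pvInner, pvCnt_getD, zero_add]
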